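-- pv_equiv track=rewrite | github.com/Miedefran/CounterfactualRegretMinimizationPoker | src/evaluation/best_response_agent_v2.py | _is_feasible_assignment_counts
-- ===== SOURCE A (Python) =====
-- def _is_feasible_assignment_counts(counts: dict, our_card: str, opp_card: str, public_cards: tuple) -> bool:
--     if counts is None:
--         return True
--     need = {}
--     if our_card is not None:
--         need[our_card] = need.get(our_card, 0) + 1
--     if opp_card is not None:
--         need[opp_card] = need.get(opp_card, 0) + 1
--     for c in public_cards or ():
--         need[c] = need.get(c, 0) + 1
--     for k, v in need.items():
--         if v > int(counts.get(k, 0)):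
--             return False
--     return True
-- ===== SOURCE B (Python) =====
-- def _is_feasible_assignment_counts(counts: dict, our_card: str, opp_card: str, public_cards: tuple) -> bool:
--     if counts is None:
--         return True
--     remaining = {}
--     for k, v in counts.items():
--         remaining[k] = int(v)
--     cards = [c for c in (our_card, opp_card) if c is not None] + list(public_cards or ())
--     for c in cards:
--         r = remaining.get(c, 0) - 1
--         if r < 0:
--             return False
--         remaining[c] = r
--     return True
-- ===== Notes on version B (the rewrite author's own statement) =====
-- stated objective: alternative
-- what changed: Instead of aggregating a demand histogram and then comparing it entry-by-entry against the counts dict, B copies the available counts once and consumes them card by card in a single pass, failing as soon as a decrement would go negative.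
import Mathlib
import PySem

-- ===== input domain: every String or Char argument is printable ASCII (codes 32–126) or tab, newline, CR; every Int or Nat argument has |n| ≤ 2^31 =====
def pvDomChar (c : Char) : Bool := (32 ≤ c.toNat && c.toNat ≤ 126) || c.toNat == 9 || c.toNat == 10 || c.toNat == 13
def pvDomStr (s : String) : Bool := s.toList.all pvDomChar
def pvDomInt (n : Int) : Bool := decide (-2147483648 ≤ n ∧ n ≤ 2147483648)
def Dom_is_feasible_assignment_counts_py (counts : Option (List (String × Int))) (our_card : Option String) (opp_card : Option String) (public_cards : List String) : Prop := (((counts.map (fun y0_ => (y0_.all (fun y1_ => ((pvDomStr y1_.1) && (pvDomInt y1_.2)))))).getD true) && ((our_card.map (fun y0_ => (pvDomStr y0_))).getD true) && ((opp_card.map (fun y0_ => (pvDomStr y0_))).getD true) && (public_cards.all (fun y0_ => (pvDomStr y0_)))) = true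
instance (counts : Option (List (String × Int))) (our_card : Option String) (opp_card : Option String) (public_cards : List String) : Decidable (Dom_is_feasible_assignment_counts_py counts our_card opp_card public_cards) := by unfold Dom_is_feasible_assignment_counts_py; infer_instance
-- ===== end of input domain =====

-- B replaces A's need-histogram-then-compare with a single pass that consumes a copy of the available counts, failing at the first deficient card (alternative decomposition, same O(n) cost); return-value equivalence proved for all inputs.


-- ===== PORT A =====
-- Port of A: builds a `need` demand histogram, then checks each needed card against counts.
-- `int(v)` on a Python int is the identity, so it is ported as the value itself.
def is_feasible_assignment_counts_py (counts : Option (List (String × Int))) (our_card : Option String) (opp_card : Option String) (public_cards : List String) : Bool :=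
  match counts with
  | none => true
  | some cs =>
    let cnts : PySem.Dict String Int := PySem.Dict.ofList cs
    let need : PySem.Dict String Int := PySem.Dict.empty
    let need := match our_card with
      | some c => need.insert c (need.getD c 0 + 1)
      | none => need
    let need := match opp_card with
      | some c => need.insert c (need.getD c 0 + 1)
      | none => need
    let need := public_cards.foldl (fun d c => d.insert c (d.getD c 0 + 1)) need
    -- 'for k, v in need.items(): if v > ...: return False' / final 'return True'
    need.items.all (fun kv => !(kv.2 > cnts.getD kv.1 0))

-- ===== PORT B =====
-- the 'for c in cards' loop of B: decrement remaining availability, early-return False if negative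
def pvConsume (cards : List String) (remaining : PySem.Dict String Int) : Bool :=
  match cards with
  | [] => true
  | c :: rest =>
    let r := remaining.getD c 0 - 1
    if r < 0 then false else pvConsume rest (remaining.insert c r)

-- Port of B: copy the available counts, then consume them card by card in one pass.
def is_feasible_assignment_counts_py_alt (counts : Option (List (String × Int))) (our_card : Option String) (opp_card : Option String) (public_cards : List String) : Bool :=
  match counts with
  | none => true
  | some cs =>
    let remaining := cs.foldl (fun d kv => d.insert kv.1 kv.2) (PySem.Dict.empty : PySem.Dict String Int)
    let cards := (our_card.toList ++ opp_card.toList) ++ public_cards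
    pvConsume cards remaining

-- ===== PRECONDITION & SPEC =====
def Spec_is_feasible_assignment_counts_py (counts : Option (List (String × Int))) (our_card : Option String) (opp_card : Option String) (public_cards : List String) (out : Bool) : Prop := out = is_feasible_assignment_counts_py_alt counts our_card opp_card public_cards
instance (counts : Option (List (String × Int))) (our_card : Option String) (opp_card : Option String) (public_cards : List String) (out : Bool) : Decidable (Spec_is_feasible_assignment_counts_py counts our_card opp_card public_cards out) := by unfold Spec_is_feasible_assignment_counts_py; infer_instance

-- ===== CLAIM (what is proved, stated in full; the proofs are below) =====
def Claim_equal_is_feasible_assignment_counts_py : Prop := ∀ (counts : Option (List (String × Int))) (our_card : Option String) (opp_card : Option String) (public_cards : List String), Dom_is_feasible_assignment_counts_py counts our_card opp_card public_cards → Spec_is_feasible_assignment_counts_py counts our_card opp_card public_cards (is_feasible_assignment_counts_py counts our_card opp_card public_cards)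


-- ===== LEMMAS AND PROOFS =====
theorem pvConsume_eq_true_iff (L : List String) (d : PySem.Dict String Int) :
    pvConsume L d = true ↔ ∀ c ∈ L, (L.count c : Int) ≤ d.getD c 0 := by
  induction L generalizing d with
  | nil => simp [pvConsume]
  | cons c rest ih =>
    simp only [pvConsume]
    split_ifs with h
    · simp only [false_iff, not_forall]
      refine ⟨c, by simp, ?_⟩
      rw [List.count_cons_self]; push_cast; omega
    · rw [ih]
      constructor
      · intro hall x hx
        by_cases hc : x = c
        · subst hc
          rw [List.count_cons_self]
          by_cases hm : x ∈ rest
          · have := hall x hm; rw [PySem.Dict.getD_insert, if_pos rfl] at this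
            push_cast at this ⊢; omega
          · rw [List.count_eq_zero.2 hm]; push_cast; omega
        · have hx' : x ∈ rest := by
            rcases List.mem_cons.1 hx with h' | h'
            · exact absurd h' hc
            · exact h'
          have := hall x hx'
          rw [PySem.Dict.getD_insert, if_neg hc] at this
          rw [List.count_cons_of_ne (Ne.symm hc)]; exact this
      · intro hall x hx
        rw [PySem.Dict.getD_insert]
        by_cases hc : x = c
        · subst hc
          have := hall x (List.mem_cons_self ..)
          rw [List.count_cons_self] at this
          rw [if_pos rfl]; push_cast at this ⊢; omega
        · have := hall x (List.mem_cons_of_mem _ hx)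
          rw [List.count_cons_of_ne (Ne.symm hc)] at this
          rw [if_neg hc]; exact this

theorem portA_eq_true_iff (cs : List (String × Int)) (our_card opp_card : Option String) (public_cards : List String) :
    is_feasible_assignment_counts_py (some cs) our_card opp_card public_cards = true ↔
      ∀ c ∈ (our_card.toList ++ opp_card.toList) ++ public_cards,
        ((((our_card.toList ++ opp_card.toList) ++ public_cards).count c : Int)) ≤
          (PySem.Dict.ofList cs).getD c 0 := by
  have hneed :
      (public_cards.foldl (fun d c => d.insert c (d.getD c 0 + 1))
        (match opp_card with
          | some c => (match our_card with
              | some c' => (PySem.Dict.empty : PySem.Dict String Int).insert c' ((PySem.Dict.empty : PySem.Dict String Int).getD c' 0 + 1)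
              | none => PySem.Dict.empty).insert c ((match our_card with
              | some c' => (PySem.Dict.empty : PySem.Dict String Int).insert c' ((PySem.Dict.empty : PySem.Dict String Int).getD c' 0 + 1)
              | none => PySem.Dict.empty).getD c 0 + 1)
          | none => (match our_card with
              | some c' => (PySem.Dict.empty : PySem.Dict String Int).insert c' ((PySem.Dict.empty : PySem.Dict String Int).getD c' 0 + 1)
              | none => PySem.Dict.empty))) =
      PySem.Dict.counter ((our_card.toList ++ opp_card.toList) ++ public_cards) := by
    rw [← PySem.Dict.foldl_insert_getD_add_one_eq_counter, List.foldl_append, List.foldl_append]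
    cases our_card <;> cases opp_card <;> rfl
  simp only [is_feasible_assignment_counts_py]
  rw [hneed]
  rw [List.all_eq_true]
  constructor
  · intro hall c hc
    have := hall (c, (((our_card.toList ++ opp_card.toList) ++ public_cards).count c : Int)) ?_
    · simpa using this
    · rw [PySem.Dict.items_counter]
      exact List.mem_map.2 ⟨c, (PySem.Set.mem_ofList ..).2 hc, rfl⟩
  · intro hall kv hkv
    rw [PySem.Dict.items_counter] at hkv
    rcases List.mem_map.1 hkv with ⟨c, hc, rfl⟩
    have := hall c ((PySem.Set.mem_ofList ..).1 hc)
    simpa using this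

-- ===== VERDICT (by name: the statement is the Claim_ definition above) =====
theorem is_feasible_assignment_counts_py_spec : Claim_equal_is_feasible_assignment_counts_py := by
  intro counts our_card opp_card public_cards _
  unfold Spec_is_feasible_assignment_counts_py
  cases counts with
  | none => rfl
  | some cs =>
    rw [Bool.eq_iff_iff, portA_eq_true_iff]
    simp only [is_feasible_assignment_counts_py_alt]
    rw [show cs.foldl (fun d kv => d.insert kv.1 kv.2) (PySem.Dict.empty : PySem.Dict String Int) = PySem.Dict.ofList cs from rfl]
    exact (pvConsume_eq_true_iff _ _).symm
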